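-- pv_equiv track=rewrite | github.com/diekinari/University-Projects | Table Manipulator API/tables.py | areTypesInAllColumnsAlike
-- ===== SOURCE A (Python) =====
-- def getColumnTypes(column):
--     result = []
--     for i in range(1, len(column)):
--         if column[i].isnumeric():
--             element_type = 'int'
--         elif column[i] in ['True', 'False']:
--             element_type = 'bool'
--         elif ''.join(column[i].split('.')).isnumeric():
--             element_type = 'float'
--         else:
--             element_type = 'str'
--
--         result.append(element_type)
--
--     return result
--
-- def areTypesInAllColumnsAlike(data):
--     statementsList = []  # [areAllTheTypesInColumn0TheSame, ...]
--     for i in range(len(data[0])):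
--         currentColumn = [data[x][i] for x in range(len(data))]
--         types = getColumnTypes(currentColumn)
--         statementsList.append(all([types[x] == types[x + 1] for x in
--                                    range(len(types) - 1)]))  # check for every type in cur column is the same
--
--     return all(statementsList)
-- ===== SOURCE B (Python) =====
-- def _classify(cell):
--     if cell.isnumeric():
--         return 'int'
--     if cell in ('True', 'False'):
--         return 'bool'
--     if ''.join(cell.split('.')).isnumeric():
--         return 'float'
--     return 'str'
--
--
-- def areTypesInAllColumnsAlike(data):
--     # Row-wise: build each data row's "type signature" over the header's width,
--     # then every column is homogeneous iff all row signatures are identical.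
--     w = len(data[0])
--     signatures = {tuple(_classify(row[i]) for i in range(w)) for row in data[1:]}
--     return len(signatures) <= 1
-- ===== Notes on version B (the rewrite author's own statement) =====
-- stated objective: alternative
-- what changed: A traverses column-by-column, materialising each column and checking adjacent classification pairs; B transposes the traversal: it computes one type-signature tuple per data row and checks column homogeneity as 'the set of row signatures has at most one element'.
import Mathlib
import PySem

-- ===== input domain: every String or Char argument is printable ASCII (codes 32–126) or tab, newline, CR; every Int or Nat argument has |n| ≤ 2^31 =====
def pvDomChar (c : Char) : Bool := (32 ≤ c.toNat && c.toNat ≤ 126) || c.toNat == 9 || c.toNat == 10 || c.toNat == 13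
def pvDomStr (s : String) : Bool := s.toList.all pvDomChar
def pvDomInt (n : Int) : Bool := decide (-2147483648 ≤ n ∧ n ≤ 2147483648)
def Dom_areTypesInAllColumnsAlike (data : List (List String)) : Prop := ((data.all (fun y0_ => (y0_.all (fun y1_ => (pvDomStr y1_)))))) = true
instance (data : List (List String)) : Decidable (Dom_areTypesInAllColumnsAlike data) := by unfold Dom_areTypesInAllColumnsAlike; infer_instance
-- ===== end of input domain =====

-- B replaces A's column-by-column adjacent-pair comparison by a row-wise scheme:
-- one type signature per data row, homogeneity ⇔ the set of signatures has ≤ 1 element (objective: alternative).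

-- ===== PORT A =====
-- str.isnumeric() is ported as PySem.Str.strIsdigit: on the printable-ASCII (+tab/NL/CR) domain
-- the numeric characters are exactly the digits 0-9, so isnumeric == isdigit there.
def getColumnTypes (column : List String) : List String :=
  (PySem.List.pyRange 1 (column.length : Int) 1).foldl (fun result i =>
    let c := PySem.List.pyGetD column i ""
    let t :=
      if PySem.Str.strIsdigit c then "int"
      else if c = "True" || c = "False" then "bool"
      else if PySem.Str.strIsdigit (PySem.Str.join "" ((PySem.Str.split? c ".").getD [])) then "float"
      else "str"
    result ++ [t]) []

def areTypesInAllColumnsAlike (data : List (List String)) : Bool :=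
  -- data[0] raises IndexError in Python on data = []; Pre_ excludes that, headD [] totalises.
  let statementsList := (PySem.List.pyRange 0 (((data.headD []).length : Int)) 1).foldl
    (fun acc i =>
      let currentColumn := (PySem.List.pyRange 0 ((data.length : Int)) 1).map
        (fun x => PySem.List.pyGetD (PySem.List.pyGetD data x []) i "")
      let types := getColumnTypes currentColumn
      acc ++ [((PySem.List.pyRange 0 ((types.length : Int) - 1) 1).map
        (fun x => PySem.List.pyGetD types x "" == PySem.List.pyGetD types (x + 1) "")).all id])
    []
  statementsList.all id

-- ===== PORT B =====
def classifyCell (cell : String) : String :=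
  if PySem.Str.strIsdigit cell then "int"
  else if cell = "True" || cell = "False" then "bool"
  else if PySem.Str.strIsdigit (PySem.Str.join "" ((PySem.Str.split? cell ".").getD [])) then "float"
  else "str"

-- tuple(_classify(row[i]) for i in range(w))
def rowSig (w : Int) (row : List String) : List String :=
  (PySem.List.pyRange 0 w 1).map (fun i => classifyCell (PySem.List.pyGetD row i ""))

def areTypesInAllColumnsAlike_alt (data : List (List String)) : Bool :=
  let w : Int := ((data.headD []).length : Int)
  let signatures : PySem.Set (List String) :=
    PySem.Set.ofList ((PySem.List.slice data (some 1) none).map (rowSig w))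
  decide (signatures.length ≤ 1)

-- ===== PRECONDITION & SPEC =====
-- Pre_ excludes exactly the inputs on which Python A raises IndexError: empty data (data[0])
-- and ragged data where some row is shorter than row 0 (data[x][i]).
def Pre_areTypesInAllColumnsAlike (data : List (List String)) : Prop :=
  data ≠ [] ∧ ∀ row ∈ data, (data.headD []).length ≤ row.length
instance (data : List (List String)) : Decidable (Pre_areTypesInAllColumnsAlike data) := by
  unfold Pre_areTypesInAllColumnsAlike; infer_instance

def pvWitness_areTypesInAllColumnsAlike : List (List String) :=
  [["a", "b"], ["1", "2"], ["3", "4.5"]]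

def Spec_areTypesInAllColumnsAlike (data : List (List String)) (out : Bool) : Prop := out = areTypesInAllColumnsAlike_alt data
instance (data : List (List String)) (out : Bool) : Decidable (Spec_areTypesInAllColumnsAlike data out) := by unfold Spec_areTypesInAllColumnsAlike; infer_instance

-- ===== CLAIM (what is proved, stated in full; the proofs are below) =====
def Claim_equal_areTypesInAllColumnsAlike : Prop := ∀ (data : List (List String)), Dom_areTypesInAllColumnsAlike data → Pre_areTypesInAllColumnsAlike data → Spec_areTypesInAllColumnsAlike data (areTypesInAllColumnsAlike data)

-- ===== LEMMAS AND PROOFS =====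

-- proof-side reformulation of A's per-column adjacent-pair check
def chainEq : List String → Bool
  | [] => true
  | [_] => true
  | a :: b :: r => (a == b) && chainEq (b :: r)

theorem getColumnTypes_eq (column : List String) :
    getColumnTypes column = (column.drop 1).map classifyCell := by
  unfold getColumnTypes
  have h := PySem.List.foldl_pyRange_pyGetD' column ""
      (fun (result : List String) (c : String) => result ++ [classifyCell c]) [] (a := 1) (by norm_num)
  simpa [classifyCell] using h.trans (by
    simpa using PySem.List.foldl_append_singleton_eq_map classifyCell (column.drop 1) [])

theorem chainEq_cons (a : String) (ts : List String) :
    chainEq (a :: ts) = ts.all (· == a) := by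
  induction ts generalizing a with
  | nil => rfl
  | cons b r ih =>
    by_cases h : a = b
    · subst h; simp [chainEq, ih]
    · have hab : (a == b) = false := by simp [h]
      have hba : (b == a) = false := by simp [Ne.symm h]
      simp [chainEq, hab, hba]

theorem adjNat_eq_chainEq (ts : List String) :
    ((List.range (ts.length - 1)).map (fun k => ts.getD k "" == ts.getD (k + 1) "")).all id
      = chainEq ts := by
  induction ts with
  | nil => rfl
  | cons a ts ih =>
    cases ts with
    | nil => rfl
    | cons b r =>
      have hlen : (a :: b :: r).length - 1 = (b :: r).length - 1 + 1 := by simp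
      rw [hlen, List.range_succ_eq_map, List.map_cons, List.all_cons, List.map_map]
      have htail : ((List.range ((b :: r).length - 1)).map
          ((fun k => (a :: b :: r).getD k "" == (a :: b :: r).getD (k + 1) "") ∘ Nat.succ)).all id
          = ((List.range ((b :: r).length - 1)).map
          (fun k => (b :: r).getD k "" == (b :: r).getD (k + 1) "")).all id := by
        have hpt : ∀ k ∈ List.range ((b :: r).length - 1),
            ((fun k => (a :: b :: r).getD k "" == (a :: b :: r).getD (k + 1) "") ∘ Nat.succ) k
            = ((b :: r).getD k "" == (b :: r).getD (k + 1) "") := by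
          intro k _
          simp [Function.comp, List.getD]
        rw [List.map_congr_left hpt]
      rw [htail, ih]
      simp [chainEq, List.getD]

theorem adjMap_eq_chainEq (ts : List String) :
    ((PySem.List.pyRange 0 ((ts.length : Int) - 1) 1).map
      (fun x => PySem.List.pyGetD ts x "" == PySem.List.pyGetD ts (x + 1) "")).all id = chainEq ts := by
  rw [PySem.List.pyRange_one, List.map_map, ← adjNat_eq_chainEq]
  have hcast : (((ts.length : Int) - 1) - 0).toNat = ts.length - 1 := by omega
  rw [hcast]
  congr 1
  apply List.map_congr_left
  intro k hk
  have hk' : (k : Int) + 1 = ((k + 1 : Nat) : Int) := by push_cast; ring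
  simp only [Function.comp_apply, zero_add, hk', PySem.List.pyGetD_natCast]

-- A's column (for index i) is the classification of each data row's i-th cell
theorem col_types_eq (data : List (List String)) (hd : data ≠ []) (i : Int) :
    getColumnTypes ((PySem.List.pyRange 0 ((data.length : Int)) 1).map
        (fun x => PySem.List.pyGetD (PySem.List.pyGetD data x []) i ""))
      = (data.drop 1).map (fun r => classifyCell (PySem.List.pyGetD r i "")) := by
  have hn : (0 : Int) < (data.length : Int) := by
    have := List.length_pos_iff.mpr hd
    exact_mod_cast this
  rw [getColumnTypes_eq, PySem.List.pyRange_one_cons hn]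
  simp only [List.map_cons, List.drop_succ_cons, List.drop_zero, zero_add]
  have hrows : (PySem.List.pyRange 1 ((data.length : Int)) 1).map
      (fun x => PySem.List.pyGetD data x []) = data.drop 1 := by
    simpa using PySem.List.map_pyGetD_pyRange' data [] (a := 1) (by norm_num)
  rw [show (fun x => PySem.List.pyGetD (PySem.List.pyGetD data x []) i "")
        = (fun r => PySem.List.pyGetD r i "") ∘ (fun x => PySem.List.pyGetD data x []) from rfl,
      ← List.map_map, hrows, List.map_map]
  rfl

-- a Python set has at most one element iff the source list is pairwise constant
theorem ofList_len_le_one {α : Type} [BEq α] [LawfulBEq α] (l : List α) :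
    (PySem.Set.ofList l).length ≤ 1 ↔ ∀ a ∈ l, ∀ b ∈ l, a = b := by
  constructor
  · intro h a ha b hb
    have ha' : a ∈ PySem.Set.ofList l := (PySem.Set.mem_ofList l a).mpr ha
    have hb' : b ∈ PySem.Set.ofList l := (PySem.Set.mem_ofList l b).mpr hb
    match hS : PySem.Set.ofList l with
    | [] => rw [hS] at ha'; cases ha'
    | [x] =>
      rw [hS] at ha' hb'
      simp only [List.mem_singleton] at ha' hb'
      rw [ha', hb']
    | x :: y :: r => rw [hS] at h; simp at h
  · intro h
    match hS : PySem.Set.ofList l with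
    | [] => simp
    | [x] => simp
    | x :: y :: r =>
      exfalso
      have hnd := PySem.Set.nodup_ofList l
      rw [hS] at hnd
      have hx : x ∈ l := (PySem.Set.mem_ofList l _).mp (by rw [hS]; simp)
      have hy : y ∈ l := (PySem.Set.mem_ofList l _).mp (by rw [hS]; simp)
      have : x = y := h x hx y hy
      subst this
      simp at hnd

-- the quantifier transpose: all columns pairwise-constant ⇔ all row signatures equal
theorem transpose_eq (M : List (List String)) (w : Int) :
    (PySem.List.pyRange 0 w 1).all
        (fun i => chainEq (M.map (fun r => classifyCell (PySem.List.pyGetD r i ""))))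
      = decide ((PySem.Set.ofList (M.map (rowSig w))).length ≤ 1) := by
  cases M with
  | nil =>
    simp [chainEq]
  | cons r0 rest =>
    rw [Bool.eq_iff_iff]
    simp only [List.all_eq_true, decide_eq_true_eq, List.map_cons, chainEq_cons, List.mem_map]
    rw [ofList_len_le_one]
    constructor
    · intro h a ha b hb
      have key : ∀ r ∈ rest, rowSig w r = rowSig w r0 := by
        intro r hr
        unfold rowSig
        apply List.map_congr_left
        intro i hi
        exact beq_iff_eq.mp (h i hi _ ⟨r, hr, rfl⟩)
      have val : ∀ c, c ∈ rowSig w r0 :: List.map (rowSig w) rest → c = rowSig w r0 := by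
        intro c hc
        rcases List.mem_cons.mp hc with hc | hc
        · exact hc
        · rcases List.mem_map.mp hc with ⟨r, hr, rfl⟩
          exact key r hr
      rw [val a ha, val b hb]
    · intro h i hi x hx
      rcases hx with ⟨r, hr, rfl⟩
      have hsig : rowSig w r = rowSig w r0 :=
        h (rowSig w r) (List.mem_cons.mpr (Or.inr (List.mem_map.mpr ⟨r, hr, rfl⟩)))
          (rowSig w r0) (List.mem_cons.mpr (Or.inl rfl))
      have hpt : ∀ j ∈ PySem.List.pyRange 0 w 1,
          classifyCell (PySem.List.pyGetD r j "") = classifyCell (PySem.List.pyGetD r0 j "") := by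
        rw [← List.map_eq_map_iff]
        exact hsig
      exact beq_iff_eq.mpr (hpt i hi)

-- ===== VERDICT (by name: the statement is the Claim_ definition above) =====
set_option maxHeartbeats 1000000 in
theorem areTypesInAllColumnsAlike_spec : Claim_equal_areTypesInAllColumnsAlike := by
  intro data _ hpre
  unfold Spec_areTypesInAllColumnsAlike areTypesInAllColumnsAlike areTypesInAllColumnsAlike_alt
  rw [PySem.List.slice_from_one, ← List.drop_one]
  simp only [PySem.List.foldl_append_singleton_eq_map, List.nil_append, List.all_map]
  rw [← transpose_eq (data.drop 1) (((data.headD []).length : Int))]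
  refine List.all_congr rfl ?_
  intro i
  simp only [Function.comp_apply, id_eq]
  rw [← List.all_map]
  rw [adjMap_eq_chainEq, col_types_eq data hpre.1 i]
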